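-- pv_equiv track=rewrite | github.com/renauld94/admins | job-search-toolkit/advanced_job_scorer.py | score_growth_potential
-- ===== SOURCE A (Python) =====
-- from typing import Dict, List, Tuple, Optional
--
-- def score_growth_potential(job_title: str, company: str, job_description: str) -> Tuple[int, str]:
--     """
--     Score growth potential (0-10 points)
--
--     Analysis:
--     - Leadership opportunities
--     - Learning opportunities
--     - Progression path
--     """
--     score = 0
--     reason = ""
--
--     job_text = job_description.lower()
--     job_title_lower = job_title.lower()
--
--     # Check for leadership
--     leadership_keywords = ["lead", "manage", "mentor", "growth", "director"]
--     has_leadership = any(kw in job_title_lower or kw in job_text for kw in leadership_keywords)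
--
--     if has_leadership:
--         score += 4
--         reason = "Leadership opportunities"
--
--     # Check for learning
--     learning_keywords = ["learn", "training", "development", "upskilling", "mentorship"]
--     has_learning = any(kw in job_text for kw in learning_keywords)
--
--     if has_learning:
--         score += 3
--         reason += "; Learning opportunities" if reason else "Learning opportunities"
--
--     # Check for modern tech
--     modern_tech = ["kubernetes", "cloud", "ai", "ml", "gcp", "aws"]
--     uses_modern = any(tech in job_text for tech in modern_tech)
--
--     if uses_modern:
--         score += 3
--         reason += "; Modern tech stack" if reason else "Modern tech stack"
--
--     return min(10, score), reason
-- ===== SOURCE B (Python) =====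
-- # Bitmask/table rewrite: the title-aware group searches one combined haystack
-- # (title + "\n" + text; keywords contain no newline so no match crosses the
-- # boundary), a 3-bit mask indexes a precomputed 8-entry (score, reason) table,
-- # so there is no score accumulation, no min() and no reason-string building.
--
-- _OUTCOMES = (
--     (0, ""),
--     (4, "Leadership opportunities"),
--     (3, "Learning opportunities"),
--     (7, "Leadership opportunities; Learning opportunities"),
--     (3, "Modern tech stack"),
--     (7, "Leadership opportunities; Modern tech stack"),
--     (6, "Learning opportunities; Modern tech stack"),
--     (10, "Leadership opportunities; Learning opportunities; Modern tech stack"),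
-- )
--
--
-- def score_growth_potential(job_title: str, company: str, job_description: str):
--     text = job_description.lower()
--     hay = job_title.lower() + "\n" + text
--     mask = 0
--     if any(k in hay for k in ("lead", "manage", "mentor", "growth", "director")):
--         mask |= 1
--     if any(k in text for k in ("learn", "training", "development", "upskilling", "mentorship")):
--         mask |= 2
--     if any(k in text for k in ("kubernetes", "cloud", "ai", "ml", "gcp", "aws")):
--         mask |= 4
--     return _OUTCOMES[mask]
-- ===== Notes on version B (the rewrite author's own statement) =====
-- stated objective: alternative
-- what changed: B computes a 3-bit presence mask (the title-aware leadership group searched in one combined title+newline+description haystack) and returns the final (score, reason) pair by indexing a precomputed 8-entry outcome table, so A's conditional score accumulation, min() and incremental reason-string concatenation disappear entirely.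
import Mathlib
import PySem

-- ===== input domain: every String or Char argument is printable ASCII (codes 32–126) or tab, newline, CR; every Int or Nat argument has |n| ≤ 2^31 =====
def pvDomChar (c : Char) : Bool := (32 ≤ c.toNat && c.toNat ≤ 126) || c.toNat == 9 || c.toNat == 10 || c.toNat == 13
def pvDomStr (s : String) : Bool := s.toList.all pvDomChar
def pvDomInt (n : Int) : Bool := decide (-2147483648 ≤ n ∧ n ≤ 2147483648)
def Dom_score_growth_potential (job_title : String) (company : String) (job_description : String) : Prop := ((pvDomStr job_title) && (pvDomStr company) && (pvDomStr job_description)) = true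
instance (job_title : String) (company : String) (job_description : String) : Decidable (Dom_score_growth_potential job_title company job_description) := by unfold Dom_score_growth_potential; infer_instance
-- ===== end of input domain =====

-- B replaces A's three conditional accumulation blocks by a 3-bit presence mask
-- indexing a precomputed 8-entry (score, reason) table, with the title-aware group
-- searched in a single combined title+"\n"+description haystack (objective: alternative).

-- ===== PORT A =====
def score_growth_potential (job_title : String) (company : String) (job_description : String) : Int × String :=
  let score : Int := 0
  let reason : String := ""
  let job_text := PySem.Str.lower job_description
  let job_title_lower := PySem.Str.lower job_title
  let leadership_keywords := ["lead", "manage", "mentor", "growth", "director"]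
  let has_leadership := leadership_keywords.any (fun kw =>
      PySem.Str.isIn kw job_title_lower || PySem.Str.isIn kw job_text)
  let score := if has_leadership then score + 4 else score
  let reason := if has_leadership then "Leadership opportunities" else reason
  let learning_keywords := ["learn", "training", "development", "upskilling", "mentorship"]
  let has_learning := learning_keywords.any (fun kw => PySem.Str.isIn kw job_text)
  let score := if has_learning then score + 3 else score
  let reason := if has_learning then
      reason ++ (if reason ≠ "" then "; Learning opportunities" else "Learning opportunities")
    else reason
  let modern_tech := ["kubernetes", "cloud", "ai", "ml", "gcp", "aws"]
  let uses_modern := modern_tech.any (fun tech => PySem.Str.isIn tech job_text)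
  let score := if uses_modern then score + 3 else score
  let reason := if uses_modern then
      reason ++ (if reason ≠ "" then "; Modern tech stack" else "Modern tech stack")
    else reason
  (min 10 score, reason)

-- ===== PORT B =====
-- the _OUTCOMES tuple of Source B
def pvOutcomes : List (Int × String) :=
  [ (0, ""),
    (4, "Leadership opportunities"),
    (3, "Learning opportunities"),
    (7, "Leadership opportunities; Learning opportunities"),
    (3, "Modern tech stack"),
    (7, "Leadership opportunities; Modern tech stack"),
    (6, "Learning opportunities; Modern tech stack"),
    (10, "Leadership opportunities; Learning opportunities; Modern tech stack") ]

def score_growth_potential_alt (job_title : String) (company : String) (job_description : String) : Int × String :=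
  let text := (PySem.Str.lower job_description).toList
  -- Python string concatenation title + "\n" + text, represented on the char-list side (exact)
  let hay := (PySem.Str.lower job_title).toList ++ '\n' :: text
  let mask : Nat := 0
  let mask := if (["lead", "manage", "mentor", "growth", "director"].map String.toList).any
      (fun k => PySem.Chars.isIn k hay) then mask ||| 1 else mask
  let mask := if (["learn", "training", "development", "upskilling", "mentorship"].map String.toList).any
      (fun k => PySem.Chars.isIn k text) then mask ||| 2 else mask
  let mask := if (["kubernetes", "cloud", "ai", "ml", "gcp", "aws"].map String.toList).any
      (fun k => PySem.Chars.isIn k text) then mask ||| 4 else mask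
  -- mask < 8, so _OUTCOMES[mask] never raises
  (PySem.List.pyGet? pvOutcomes (mask : Int)).getD (0, "")

-- ===== PRECONDITION & SPEC =====
def Spec_score_growth_potential (job_title : String) (company : String) (job_description : String) (out : Int × String) : Prop := out = score_growth_potential_alt job_title company job_description
instance (job_title : String) (company : String) (job_description : String) (out : Int × String) : Decidable (Spec_score_growth_potential job_title company job_description out) := by unfold Spec_score_growth_potential; infer_instance

-- ===== CLAIM (what is proved, stated in full; the proofs are below) =====
def Claim_equal_score_growth_potential : Prop := ∀ (job_title : String) (company : String) (job_description : String), Dom_score_growth_potential job_title company job_description → Spec_score_growth_potential job_title company job_description (score_growth_potential job_title company job_description)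

-- ===== LEMMAS AND PROOFS =====

-- a keyword without the separator char is a prefix of a ++ sep :: b only within a
theorem pv_prefix_sep {sep : Char} : ∀ (a kw : List Char) (b : List Char), sep ∉ kw →
    kw <+: (a ++ sep :: b) → kw <+: a := by
  intro a
  induction a with
  | nil =>
    intro kw b hsep hpre
    cases kw with
    | nil => exact List.nil_prefix
    | cons d kw' =>
      rcases hpre with ⟨t, ht⟩
      simp only [List.nil_append, List.cons_append, List.cons.injEq] at ht
      exact absurd (ht.1 ▸ List.mem_cons_self ..) hsep
  | cons c a' ih =>
    intro kw b hsep hpre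
    cases kw with
    | nil => exact List.nil_prefix
    | cons d kw' =>
      rcases hpre with ⟨t, ht⟩
      simp only [List.cons_append, List.cons.injEq] at ht
      obtain ⟨rfl, ht⟩ := ht
      have hk : kw' <+: a' := ih kw' b (fun h => hsep (List.mem_cons_of_mem _ h)) ⟨t, ht⟩
      exact List.cons_prefix_cons.mpr ⟨rfl, hk⟩

-- a keyword without the separator char is an infix of a ++ sep :: b iff it is in a or in b
theorem pv_infix_sep {sep : Char} (kw : List Char) (hsep : sep ∉ kw) :
    ∀ (a b : List Char), kw <:+: (a ++ sep :: b) ↔ (kw <:+: a ∨ kw <:+: b) := by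
  intro a
  induction a with
  | nil =>
    intro b
    constructor
    · intro h
      rw [List.nil_append, List.infix_cons_iff] at h
      rcases h with h | h
      · cases kw with
        | nil => exact Or.inl List.nil_infix
        | cons d kw' =>
          rcases h with ⟨t, ht⟩
          simp only [List.cons_append, List.cons.injEq] at ht
          exact absurd (ht.1 ▸ List.mem_cons_self ..) hsep
      · exact Or.inr h
    · rintro (h | h)
      · rw [List.infix_nil] at h
        subst h
        exact List.nil_infix
      · exact h.trans (List.suffix_cons sep b).isInfix
  | cons c a' ih =>
    intro b
    constructor
    · intro h
      rw [List.cons_append, List.infix_cons_iff] at h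
      rcases h with h | h
      · have hp : kw <+: (c :: a') := pv_prefix_sep (c :: a') kw b hsep (by simpa using h)
        exact Or.inl hp.isInfix
      · rcases (ih b).mp h with h' | h'
        · exact Or.inl (h'.trans (List.suffix_cons c a').isInfix)
        · exact Or.inr h'
    · rintro (h | h)
      · exact h.trans (List.prefix_append _ _).isInfix
      · exact h.trans ((List.suffix_cons sep b).trans (List.suffix_append _ _)).isInfix

-- boolean form of pv_infix_sep, on PySem.Chars.isIn
theorem pv_isIn_sep {sep : Char} (kw : List Char) (hsep : sep ∉ kw) (a b : List Char) :
    PySem.Chars.isIn kw (a ++ sep :: b) = (PySem.Chars.isIn kw a || PySem.Chars.isIn kw b) := by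
  cases hA : PySem.Chars.isIn kw a with
  | true =>
    simp only [Bool.true_or]
    exact (PySem.Chars.isIn_iff_infix ..).mpr ((pv_infix_sep kw hsep a b).mpr
      (Or.inl ((PySem.Chars.isIn_iff_infix ..).mp hA)))
  | false =>
    cases hB : PySem.Chars.isIn kw b with
    | true =>
      simp only [Bool.or_true]
      exact (PySem.Chars.isIn_iff_infix ..).mpr ((pv_infix_sep kw hsep a b).mpr
        (Or.inr ((PySem.Chars.isIn_iff_infix ..).mp hB)))
    | false =>
      simp only [Bool.or_false]
      rw [PySem.Chars.isIn_eq_false_iff] at hA hB ⊢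
      intro h
      rcases (pv_infix_sep kw hsep a b).mp h with h | h
      · exact hA h
      · exact hB h

-- ===== VERDICT (by name: the statement is the Claim_ definition above) =====
theorem score_growth_potential_spec : Claim_equal_score_growth_potential := by
  intro jt c jd _
  show _ = _
  simp only [score_growth_potential, score_growth_potential_alt, List.any, List.map,
    PySem.Str.isIn_eq]
  simp only [pv_isIn_sep (sep := '\n') "lead".toList (by decide), pv_isIn_sep (sep := '\n') "manage".toList (by decide),
    pv_isIn_sep (sep := '\n') "mentor".toList (by decide), pv_isIn_sep (sep := '\n') "growth".toList (by decide),
    pv_isIn_sep (sep := '\n') "director".toList (by decide)]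
  rcases Bool.eq_false_or_eq_true (PySem.Chars.isIn "lead".toList (PySem.Str.lower jt).toList ||
        PySem.Chars.isIn "lead".toList (PySem.Str.lower jd).toList ||
      (PySem.Chars.isIn "manage".toList (PySem.Str.lower jt).toList ||
          PySem.Chars.isIn "manage".toList (PySem.Str.lower jd).toList ||
        (PySem.Chars.isIn "mentor".toList (PySem.Str.lower jt).toList ||
            PySem.Chars.isIn "mentor".toList (PySem.Str.lower jd).toList ||
          (PySem.Chars.isIn "growth".toList (PySem.Str.lower jt).toList ||
              PySem.Chars.isIn "growth".toList (PySem.Str.lower jd).toList ||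
            (PySem.Chars.isIn "director".toList (PySem.Str.lower jt).toList ||
                PySem.Chars.isIn "director".toList (PySem.Str.lower jd).toList ||
              false))))) with hld | hld <;>
  rcases Bool.eq_false_or_eq_true (PySem.Chars.isIn "learn".toList (PySem.Str.lower jd).toList ||
      (PySem.Chars.isIn "training".toList (PySem.Str.lower jd).toList ||
        (PySem.Chars.isIn "development".toList (PySem.Str.lower jd).toList ||
          (PySem.Chars.isIn "upskilling".toList (PySem.Str.lower jd).toList ||
            (PySem.Chars.isIn "mentorship".toList (PySem.Str.lower jd).toList || false))))) with hln | hln <;>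
  rcases Bool.eq_false_or_eq_true (PySem.Chars.isIn "kubernetes".toList (PySem.Str.lower jd).toList ||
      (PySem.Chars.isIn "cloud".toList (PySem.Str.lower jd).toList ||
        (PySem.Chars.isIn "ai".toList (PySem.Str.lower jd).toList ||
          (PySem.Chars.isIn "ml".toList (PySem.Str.lower jd).toList ||
            (PySem.Chars.isIn "gcp".toList (PySem.Str.lower jd).toList ||
              (PySem.Chars.isIn "aws".toList (PySem.Str.lower jd).toList || false)))))) with hm | hm <;>
    simp only [hld, hln, hm] <;> simp [pvOutcomes, PySem.List.pyGet?, PySem.List.pyIdx?]
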